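-- pv_equiv track=rewrite | github.com/Likelion-Algorithm/AlgoStudy | 동적 계획법/N으로 표현/영택.py | solution
-- ===== SOURCE A (Python) =====
-- def solution(N, number):
--     answer = -1
--     DP = []
--
--     for i in range(1, 9):
--         numbers = set()
--         numbers.add(int(str(N) * i))
--
--         for j in range(0, i-1):
--             for op1 in DP[j]:
--                 for op2 in DP[-j-1]:
--                     numbers.add(op1 + op2)
--                     numbers.add(op1 - op2)
--                     numbers.add(op1 * op2)
--                     if op2 != 0: numbers.add(op1 // op2)
--
--         if number in numbers:
--             answer = i
--             break
--
--         DP.append(numbers)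
--
--     return answer
-- ===== SOURCE B (Python) =====
-- def reach(N, k):
--     # values expressible with exactly k copies of N
--     values = {int(str(N) * k)}
--     for j in range(1, k):
--         left = reach(N, j)
--         right = reach(N, k - j)
--         for op1 in left:
--             for op2 in right:
--                 values.add(op1 + op2)
--                 values.add(op1 - op2)
--                 values.add(op1 * op2)
--                 if op2 != 0:
--                     values.add(op1 // op2)
--     return values
--
--
-- def solution(N, number):
--     for i in range(1, 9):
--         if number in reach(N, i):
--             return i
--     return -1
-- ===== Notes on version B (the rewrite author's own statement) =====
-- stated objective: alternative
-- what changed: Replaces A's bottom-up DP list (indexed with DP[j]/DP[-j-1] inside a break-driven loop carrying an answer accumulator) by a top-down recursive helper reach(k) over the split count, with the driver simply returning the first i in 1..8 whose reach(i) contains number; Pre_ excludes N < 0 with number != N, where both programs raise ValueError on int(str(N)*2).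
import Mathlib
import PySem

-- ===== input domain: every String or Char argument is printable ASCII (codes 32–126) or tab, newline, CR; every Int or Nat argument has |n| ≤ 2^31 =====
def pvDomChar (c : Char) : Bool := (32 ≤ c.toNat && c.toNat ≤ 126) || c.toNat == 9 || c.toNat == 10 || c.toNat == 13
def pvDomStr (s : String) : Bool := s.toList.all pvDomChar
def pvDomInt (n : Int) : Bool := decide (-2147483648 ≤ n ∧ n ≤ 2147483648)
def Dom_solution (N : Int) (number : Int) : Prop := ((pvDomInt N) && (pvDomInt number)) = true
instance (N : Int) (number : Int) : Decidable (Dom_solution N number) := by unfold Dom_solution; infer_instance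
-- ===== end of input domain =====

-- B replaces A's bottom-up DP list with negative indexing by a top-down recursion reach(k)
-- over the split count; same values, alternative decomposition (return value only, no mutation).

-- Python's set is modelled with Std.HashSet (in both ports): the returned Int depends only on
-- set MEMBERSHIP, never on a set's iteration order (every element added ends up in the set
-- whatever the order of the two nested loops), so this is exact for the return value while
-- evaluating fast; CPython's hash iteration order itself is not modelled (and cannot matter).

-- ===== PORT A =====
-- int(str(N) * i): string repetition then parse, ported by hand (exact for the parse;
-- the .getD 0 fallback is reachable only outside Pre_solution, where Python raises ValueError)
def pvConcatA (N : Int) (i : Int) : Int :=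
  (PySem.Int.ofChars? (List.flatten (List.replicate i.toNat (PySem.Int.toChars N)))).getD 0

-- the inner double loop over op1/op2 adding the four arithmetic combinations
def pvOpsA (acc : Std.HashSet Int) (s1 s2 : Std.HashSet Int) : Std.HashSet Int :=
  s1.fold (fun acc op1 =>
    s2.fold (fun acc op2 =>
      let acc := acc.insert (op1 + op2)
      let acc := acc.insert (op1 - op2)
      let acc := acc.insert (op1 * op2)
      if op2 ≠ 0 then acc.insert (PySem.Int.floordiv op1 op2) else acc) acc) acc

-- the body computing `numbers` for loop index i from the DP list (DP[j] and DP[-j-1])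
def pvNumbersA (N : Int) (i : Int) (DP : List (Std.HashSet Int)) : Std.HashSet Int :=
  (PySem.List.pyRange 0 (i - 1) 1).foldl (fun numbers j =>
      pvOpsA numbers ((PySem.List.pyGet? DP j).getD ∅)
        ((PySem.List.pyGet? DP (-j - 1)).getD ∅))
    ((∅ : Std.HashSet Int).insert (pvConcatA N i))

def pvLoopA (N : Int) (number : Int) : List Int → Int → List (Std.HashSet Int) → Int
  | [], answer, _ => answer
  | i :: rest, answer, DP =>
    let numbers := pvNumbersA N i DP
    if numbers.contains number then i
    else pvLoopA N number rest answer (DP ++ [numbers])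

def solution (N : Int) (number : Int) : Int :=
  pvLoopA N number (PySem.List.pyRange 1 9 1) (-1) []

-- ===== PORT B =====
-- int(str(N) * k), as in port A
def pvConcatB (N : Int) (k : Nat) : Int :=
  (PySem.Int.ofChars? (List.flatten (List.replicate k (PySem.Int.toChars N)))).getD 0

-- the inner double loop over op1/op2 (identical in both Python programs)
def pvOpsB (acc : Std.HashSet Int) (s1 s2 : Std.HashSet Int) : Std.HashSet Int :=
  s1.fold (fun acc op1 =>
    s2.fold (fun acc op2 =>
      let acc := acc.insert (op1 + op2)
      let acc := acc.insert (op1 - op2)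
      let acc := acc.insert (op1 * op2)
      if op2 ≠ 0 then acc.insert (PySem.Int.floordiv op1 op2) else acc) acc) acc

-- reach(N, k): `for j in range(1, k)` is traversed as j = t + 1 for t in range(k-1)
def pvReach (N : Int) (k : Nat) : Std.HashSet Int :=
  (List.range (k - 1)).attach.foldl (fun values t =>
      pvOpsB values (pvReach N (t.1 + 1)) (pvReach N (k - (t.1 + 1))))
    ((∅ : Std.HashSet Int).insert (pvConcatB N k))
termination_by k
decreasing_by
  all_goals (have := t.2; simp only [List.mem_range] at this; omega)

def pvFindB (N : Int) (number : Int) : List Nat → Int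
  | [] => -1
  | i :: rest => if (pvReach N i).contains number then (i : Int) else pvFindB N number rest

def solution_alt (N : Int) (number : Int) : Int :=
  pvFindB N number (List.range' 1 8)  -- range(1, 9)

-- ===== PRECONDITION & SPEC =====
-- Pre_ excludes N < 0 with number ≠ N: there A raises ValueError at i = 2 (int("-N-N")).
def Pre_solution (N : Int) (number : Int) : Prop := 0 ≤ N ∨ number = N
instance (N : Int) (number : Int) : Decidable (Pre_solution N number) := by
  unfold Pre_solution; infer_instance

def pvWitness_solution : Int × Int := (5, 12)

def Spec_solution (N : Int) (number : Int) (out : Int) : Prop := out = solution_alt N number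
instance (N : Int) (number : Int) (out : Int) : Decidable (Spec_solution N number out) := by unfold Spec_solution; infer_instance

-- ===== CLAIM (what is proved, stated in full; the proofs are below) =====
def Claim_equal_solution : Prop := ∀ (N : Int) (number : Int), Dom_solution N number → Pre_solution N number → Spec_solution N number (solution N number)

-- ===== LEMMAS AND PROOFS =====

theorem pvOps_eq : pvOpsA = pvOpsB := rfl

theorem pvNumbers_eq_1 (N : Int) : pvNumbersA N 1 [] = pvReach N 1 := by
  conv_rhs => rw [pvReach]
  simp [pvNumbersA, pvConcatA, pvConcatB, PySem.List.pyRange, pvOps_eq,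
    PySem.List.pyGet?, PySem.List.pyIdx?, List.range, List.range.loop]

theorem pvNumbers_eq_2 (N : Int) : pvNumbersA N 2 [pvReach N 1] = pvReach N 2 := by
  conv_rhs => rw [pvReach]
  simp [pvNumbersA, pvConcatA, pvConcatB, PySem.List.pyRange, pvOps_eq,
    PySem.List.pyGet?, PySem.List.pyIdx?, List.range, List.range.loop]

theorem pvNumbers_eq_3 (N : Int) : pvNumbersA N 3 [pvReach N 1, pvReach N 2] = pvReach N 3 := by
  conv_rhs => rw [pvReach]
  simp [pvNumbersA, pvConcatA, pvConcatB, PySem.List.pyRange, pvOps_eq,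
    PySem.List.pyGet?, PySem.List.pyIdx?, List.range, List.range.loop]

theorem pvNumbers_eq_4 (N : Int) : pvNumbersA N 4 [pvReach N 1, pvReach N 2, pvReach N 3] = pvReach N 4 := by
  conv_rhs => rw [pvReach]
  simp [pvNumbersA, pvConcatA, pvConcatB, PySem.List.pyRange, pvOps_eq,
    PySem.List.pyGet?, PySem.List.pyIdx?, List.range, List.range.loop]

theorem pvNumbers_eq_5 (N : Int) : pvNumbersA N 5 [pvReach N 1, pvReach N 2, pvReach N 3, pvReach N 4] = pvReach N 5 := by
  conv_rhs => rw [pvReach]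
  simp [pvNumbersA, pvConcatA, pvConcatB, PySem.List.pyRange, pvOps_eq,
    PySem.List.pyGet?, PySem.List.pyIdx?, List.range, List.range.loop]

theorem pvNumbers_eq_6 (N : Int) : pvNumbersA N 6 [pvReach N 1, pvReach N 2, pvReach N 3, pvReach N 4, pvReach N 5] = pvReach N 6 := by
  conv_rhs => rw [pvReach]
  simp [pvNumbersA, pvConcatA, pvConcatB, PySem.List.pyRange, pvOps_eq,
    PySem.List.pyGet?, PySem.List.pyIdx?, List.range, List.range.loop]

theorem pvNumbers_eq_7 (N : Int) : pvNumbersA N 7 [pvReach N 1, pvReach N 2, pvReach N 3, pvReach N 4, pvReach N 5, pvReach N 6] = pvReach N 7 := by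
  conv_rhs => rw [pvReach]
  simp [pvNumbersA, pvConcatA, pvConcatB, PySem.List.pyRange, pvOps_eq,
    PySem.List.pyGet?, PySem.List.pyIdx?, List.range, List.range.loop]

theorem pvNumbers_eq_8 (N : Int) : pvNumbersA N 8 [pvReach N 1, pvReach N 2, pvReach N 3, pvReach N 4, pvReach N 5, pvReach N 6, pvReach N 7] = pvReach N 8 := by
  conv_rhs => rw [pvReach]
  simp [pvNumbersA, pvConcatA, pvConcatB, PySem.List.pyRange, pvOps_eq,
    PySem.List.pyGet?, PySem.List.pyIdx?, List.range, List.range.loop]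

theorem solution_eq (N : Int) (number : Int) : solution N number = solution_alt N number := by
  rw [solution, solution_alt,
    show PySem.List.pyRange 1 9 1 = [1, 2, 3, 4, 5, 6, 7, 8] from by decide,
    show List.range' 1 8 = [1, 2, 3, 4, 5, 6, 7, 8] from rfl]
  simp only [pvLoopA, pvFindB, List.nil_append, List.cons_append]
  rw [pvNumbers_eq_1, pvNumbers_eq_2, pvNumbers_eq_3, pvNumbers_eq_4, pvNumbers_eq_5,
    pvNumbers_eq_6, pvNumbers_eq_7, pvNumbers_eq_8]
  norm_num

-- ===== VERDICT (by name: the statement is the Claim_ definition above) =====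
theorem solution_spec : Claim_equal_solution := by
  intro N number _ _
  unfold Spec_solution
  exact solution_eq N number
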